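-- pv_equiv track=rewrite | github.com/WinDustick/WinStore | scripts/data_generation/products/generate_psu.py | pick_psu_vendors
-- ===== SOURCE A (Python) =====
-- from typing import List, Dict, Any, Optional, Tuple
--
-- PREFERRED_PSU_VENDORS = [
--     'Seasonic', 'Sea Sonic', 'Super Flower', 'Corsair', 'EVGA Corporation', 'EVGA', 'Cooler Master',
--     'be quiet!', 'FSP Group', 'Thermaltake', 'Chieftec', 'Antec', 'XFX', 'Gigabyte Technology', 'Gigabyte', 'MSI',
--     'SilverStone', 'NZXT'
-- ]
--
-- def pick_psu_vendors(vendors_map: Dict[str, int]) -> List[Tuple[str, int]]: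
--     vm_lower = {k.lower(): (k, vid) for k, vid in vendors_map.items()}
--     chosen: List[Tuple[str, int]] = []
--     for name in PREFERRED_PSU_VENDORS:
--         hit = vm_lower.get(name.lower())
--         if hit:
--             chosen.append(hit)
--     if chosen:
--         return chosen
--     # Fallback deterministic sample
--     fallback = list(vendors_map.items())
--     fallback.sort(key=lambda x: x[0].lower())
--     return fallback[:10]
-- ===== SOURCE B (Python) =====
-- PREFERRED_PSU_VENDORS = [
--     'Seasonic', 'Sea Sonic', 'Super Flower', 'Corsair', 'EVGA Corporation', 'EVGA', 'Cooler Master',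
--     'be quiet!', 'FSP Group', 'Thermaltake', 'Chieftec', 'Antec', 'XFX', 'Gigabyte Technology', 'Gigabyte', 'MSI',
--     'SilverStone', 'NZXT'
-- ]
--
-- def pick_psu_vendors(vendors_map):
--     # Single pass over the vendors: bucket each matching vendor by its rank in
--     # the preference list, then read the buckets out in rank order.
--     rank = {name.lower(): i for i, name in enumerate(PREFERRED_PSU_VENDORS)}
--     slots = {}
--     for key, vid in vendors_map.items():
--         r = rank.get(key.lower())
--         if r is not None:
--             slots[r] = (key, vid)
--     if slots:
--         return [slots[r] for r in sorted(slots)]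
--     # Fallback deterministic sample
--     return sorted(vendors_map.items(), key=lambda x: x[0].lower())[:10]
-- ===== Notes on version B (the rewrite author's own statement) =====
-- stated objective: alternative
-- what changed: B inverts the iteration: instead of A's preferred-driven loop looking each preferred name up in a lowercased copy of the vendors dict, B makes one pass over the vendors, bucketing each matching vendor into a slot keyed by its rank in the preference list, and reads the slots out in rank order; fallback unchanged.
import Mathlib
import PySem

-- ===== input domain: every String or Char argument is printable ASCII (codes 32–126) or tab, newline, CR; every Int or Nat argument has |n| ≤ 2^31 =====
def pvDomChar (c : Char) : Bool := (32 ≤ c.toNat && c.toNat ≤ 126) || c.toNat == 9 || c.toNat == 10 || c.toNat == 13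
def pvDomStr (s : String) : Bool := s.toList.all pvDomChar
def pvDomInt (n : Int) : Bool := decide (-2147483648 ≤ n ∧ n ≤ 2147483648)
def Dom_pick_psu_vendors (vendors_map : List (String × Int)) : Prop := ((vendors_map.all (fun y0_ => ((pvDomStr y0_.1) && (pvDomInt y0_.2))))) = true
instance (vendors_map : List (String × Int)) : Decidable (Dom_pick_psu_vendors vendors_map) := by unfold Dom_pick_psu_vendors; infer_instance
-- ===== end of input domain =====

-- B inverts the iteration: one pass over the vendors bucketing each match by its rank in the
-- preference list, read out in rank order (objective: alternative decomposition, same result).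

def PREFERRED_PSU_VENDORS : List String := [
  "Seasonic", "Sea Sonic", "Super Flower", "Corsair", "EVGA Corporation", "EVGA", "Cooler Master",
  "be quiet!", "FSP Group", "Thermaltake", "Chieftec", "Antec", "XFX", "Gigabyte Technology", "Gigabyte", "MSI",
  "SilverStone", "NZXT"
]

-- ===== PORT A =====
def pick_psu_vendors (vendors_map : List (String × Int)) : List (String × Int) :=
  let vm_lower : PySem.Dict String (String × Int) :=
    vendors_map.foldl (fun d p => d.insert (PySem.Str.lower p.1) (p.1, p.2)) PySem.Dict.empty
  let chosen : List (String × Int) :=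
    PREFERRED_PSU_VENDORS.foldl (fun acc name =>
      match vm_lower.get? (PySem.Str.lower name) with
      | some hit => acc ++ [hit]      -- a (k, vid) pair is always truthy
      | none => acc) []
  if chosen ≠ [] then chosen
  else (PySem.List.sorted vendors_map (fun x => PySem.Str.lower x.1) false).take 10

-- ===== PORT B =====
-- {name.lower(): i for i, name in enumerate(PREFERRED_PSU_VENDORS)}
def pvRank : PySem.Dict String Int :=
  (PySem.List.enumerate PREFERRED_PSU_VENDORS 0).foldl
    (fun d p => d.insert (PySem.Str.lower p.2) p.1) PySem.Dict.empty

-- the slot-filling loop over the vendors ('slots[r] = (key, vid)')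
def pvSlots (vendors_map : List (String × Int)) : PySem.Dict Int (String × Int) :=
  vendors_map.foldl (fun s p =>
    match pvRank.get? (PySem.Str.lower p.1) with
    | some r => s.insert r p
    | none => s) PySem.Dict.empty

def pick_psu_vendors_alt (vendors_map : List (String × Int)) : List (String × Int) :=
  let slots := pvSlots vendors_map
  if slots.size ≠ 0 then
    -- 'slots[r] for r in sorted(slots)': r ranges over keys of slots, so the getD default is never read
    (PySem.List.sorted slots.keys (fun x => x) false).map (fun r => slots.getD r ("", 0))
  else
    (PySem.List.sorted vendors_map (fun x => PySem.Str.lower x.1) false).take 10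

-- ===== PRECONDITION & SPEC =====
def Spec_pick_psu_vendors (vendors_map : List (String × Int)) (out : List (String × Int)) : Prop := out = pick_psu_vendors_alt vendors_map
instance (vendors_map : List (String × Int)) (out : List (String × Int)) : Decidable (Spec_pick_psu_vendors vendors_map out) := by unfold Spec_pick_psu_vendors; infer_instance

-- ===== CLAIM (what is proved, stated in full; the proofs are below) =====
def Claim_equal_pick_psu_vendors : Prop := ∀ (vendors_map : List (String × Int)), Dom_pick_psu_vendors vendors_map → Spec_pick_psu_vendors vendors_map (pick_psu_vendors vendors_map)

-- ===== LEMMAS AND PROOFS =====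

-- the 18 preferred names lowercased, and their ranks
def pvLows : List String := ["seasonic", "sea sonic", "super flower", "corsair",
  "evga corporation", "evga", "cooler master", "be quiet!", "fsp group", "thermaltake",
  "chieftec", "antec", "xfx", "gigabyte technology", "gigabyte", "msi", "silverstone", "nzxt"]

def pvIdx : List Int := [0, 1, 2, 3, 4, 5, 6, 7, 8, 9, 10, 11, 12, 13, 14, 15, 16, 17]

-- the last vendor entry whose lowercased key equals `key` (what A's lowercased dict stores)
def pvLastMatch (vm : List (String × Int)) (key : String) : Option (String × Int) :=
  vm.foldl (fun hit p => if PySem.Str.lower p.1 == key then some (p.1, p.2) else hit) none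

-- the (rank, entry) pairs of the vendors that match some preferred name
def pvMatched (vm : List (String × Int)) : List (Int × (String × Int)) :=
  vm.filterMap (fun p => (pvRank.get? (PySem.Str.lower p.1)).map (fun r => (r, p)))

-- A's lowercased-dict lookup is the last-match scan.
theorem get?_fold_insert_eq_scan (xs : List (String × Int))
    (d : PySem.Dict String (String × Int)) (key : String) :
    (xs.foldl (fun d p => d.insert (PySem.Str.lower p.1) (p.1, p.2)) d).get? key
      = xs.foldl (fun hit p => if PySem.Str.lower p.1 == key then some (p.1, p.2) else hit)
          (d.get? key) := by
  induction xs generalizing d with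
  | nil => rfl
  | cons a xs ih =>
    simp only [List.foldl_cons, ih, PySem.Dict.get?_insert, beq_iff_eq]
    by_cases h : PySem.Str.lower a.1 = key
    · simp [h]
    · rw [if_neg (fun h' : key = PySem.Str.lower a.1 => h h'.symm), if_neg h]

-- an append-on-some loop is a filterMap
theorem foldl_match_append (l : List String) (g : String → Option (String × Int))
    (acc : List (String × Int)) :
    l.foldl (fun acc name => match g name with | some h => acc ++ [h] | none => acc) acc
      = acc ++ l.filterMap g := by
  induction l generalizing acc with
  | nil => simp
  | cons a l ih => cases h : g a <;> simp [h, ih]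

-- A's chosen list, closed form
theorem chosenA_eq (vm : List (String × Int)) :
    PREFERRED_PSU_VENDORS.foldl (fun acc name =>
      match (vm.foldl (fun d p => d.insert (PySem.Str.lower p.1) (p.1, p.2))
              PySem.Dict.empty).get? (PySem.Str.lower name) with
      | some hit => acc ++ [hit]
      | none => acc) []
    = pvLows.filterMap (pvLastMatch vm) := by
  have hstep : ∀ (acc : List (String × Int)) (name : String),
      (match (vm.foldl (fun d p => d.insert (PySem.Str.lower p.1) (p.1, p.2))
              PySem.Dict.empty).get? (PySem.Str.lower name) with
       | some hit => acc ++ [hit]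
       | none => acc)
      = (match pvLastMatch vm (PySem.Str.lower name) with
         | some hit => acc ++ [hit]
         | none => acc) := by
    intro acc name
    rw [get?_fold_insert_eq_scan vm PySem.Dict.empty (PySem.Str.lower name),
        PySem.Dict.get?_empty]
    rfl
  rw [PySem.List.foldl_congr_mem _ _ _ _ (fun acc x _ => hstep acc x),
      foldl_match_append PREFERRED_PSU_VENDORS (fun n => pvLastMatch vm (PySem.Str.lower n)) []]
  have hl : pvLows = PREFERRED_PSU_VENDORS.map PySem.Str.lower := by decide
  rw [hl, List.filterMap_map]
  rfl

-- B's slot loop is a plain insert loop over the matched pairs.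
theorem slots_eq_matched_fold (vm : List (String × Int)) :
    pvSlots vm = (pvMatched vm).foldl (fun d q => d.insert q.1 q.2) PySem.Dict.empty := by
  unfold pvSlots pvMatched
  rw [List.foldl_filterMap]
  refine PySem.List.foldl_congr_mem _ _ _ _ ?_
  intro d p _
  cases h : pvRank.get? (PySem.Str.lower p.1) <;> simp

-- lookup in an insert loop over pairs is the last-match scan
theorem get?_foldl_insert_pairs (ps : List (Int × (String × Int)))
    (d : PySem.Dict Int (String × Int)) (i : Int) :
    (ps.foldl (fun d q => d.insert q.1 q.2) d).get? i
      = ps.foldl (fun hit q => if q.1 == i then some q.2 else hit) (d.get? i) := by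
  induction ps generalizing d with
  | nil => rfl
  | cons a ps ih =>
    simp only [List.foldl_cons, ih, PySem.Dict.get?_insert, beq_iff_eq]
    by_cases h : a.1 = i
    · simp [h]
    · rw [if_neg (fun h' : i = a.1 => h h'.symm), if_neg h]

theorem slots_get?_scan (vm : List (String × Int)) (i : Int) :
    (pvSlots vm).get? i
      = vm.foldl (fun hit p =>
          if pvRank.get? (PySem.Str.lower p.1) == some i then some p else hit) none := by
  rw [slots_eq_matched_fold, get?_foldl_insert_pairs, PySem.Dict.get?_empty, pvMatched,
      List.foldl_filterMap]
  refine PySem.List.foldl_congr_mem _ _ _ _ ?_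
  intro hit p _
  cases h : pvRank.get? (PySem.Str.lower p.1) <;> simp

-- characterisation of pvRank: 'rank.get?(s) == some k' tests 's == low' when low is k's key
theorem pvRank_char (k : Int) (low : String) (hlow : pvRank.get? low = some k)
    (huniq : ∀ p ∈ pvRank.items, p.2 = k → p.1 = low) (s : String) :
    (pvRank.get? s == some k) = (s == low) := by
  cases h : pvRank.get? s with
  | none =>
    have hne : s ≠ low := fun e => by rw [e, hlow] at h; cases h
    simp [hne]
  | some v =>
    by_cases hv : v = k
    · subst hv
      have hm := PySem.Dict.mem_items_of_get?_eq_some _ h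
      have hs : s = low := huniq _ hm rfl
      simp [hs]
    · have hne : s ≠ low := fun e => by
        rw [e, hlow] at h; exact hv (Option.some.inj h).symm
      simp [hv, hne]

-- every rank pvRank assigns lies in pvIdx
theorem pvRank_range (s : String) (i : Int) (h : pvRank.get? s = some i) : i ∈ pvIdx := by
  have hall : ∀ p ∈ pvRank.items, p.2 ∈ pvIdx := by decide
  exact hall _ (PySem.Dict.mem_items_of_get?_eq_some _ h)

theorem slots_keys_nodup (vm : List (String × Int)) : (pvSlots vm).keys.Nodup := by
  rw [slots_eq_matched_fold]
  exact PySem.Dict.nodup_keys_foldl_insert_key (pvMatched vm) (·.1) (fun d q => q.2)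
    PySem.Dict.empty PySem.Dict.nodup_keys_empty

theorem slots_keys_sub (vm : List (String × Int)) : ∀ i ∈ (pvSlots vm).keys, i ∈ pvIdx := by
  intro i hi
  rw [slots_eq_matched_fold,
      PySem.Dict.keys_foldl_insert_key (pvMatched vm) (·.1) (fun d q => q.2)
        PySem.Dict.empty] at hi
  rw [PySem.Dict.keys_empty] at hi
  have hupd : PySem.Set.update ([] : PySem.Set Int) ((pvMatched vm).map (·.1))
      = PySem.Set.ofList ((pvMatched vm).map (·.1)) := rfl
  rw [hupd] at hi
  have : i ∈ (pvMatched vm).map (·.1) :=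
    (PySem.Set.mem_ofList ((pvMatched vm).map (·.1)) i).mp hi
  rcases List.mem_map.mp this with ⟨q, hq, rfl⟩
  rcases List.mem_filterMap.mp hq with ⟨p, _, hp⟩
  rcases Option.map_eq_some_iff.mp hp with ⟨r, hr, rfl⟩
  exact pvRank_range _ _ hr

theorem mem_keys_iff_contains (vm : List (String × Int)) (i : Int) :
    i ∈ (pvSlots vm).keys ↔ (pvSlots vm).contains i = true :=
  (PySem.Dict.contains_iff_mem_keys _ _).symm

theorem sorted_keys_eq (vm : List (String × Int)) :
    PySem.List.sorted (pvSlots vm).keys (fun x => x) false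
      = pvIdx.filter (fun i => (pvSlots vm).contains i) := by
  apply PySem.List.sorted_eq_of_perm_of_pairwise_lt
  · refine (List.perm_ext_iff_of_nodup ?_ (slots_keys_nodup vm)).mpr ?_
    · exact (by decide : pvIdx.Nodup).filter _
    · intro i
      simp only [List.mem_filter]
      constructor
      · rintro ⟨_, hc⟩; exact (mem_keys_iff_contains vm i).mpr hc
      · intro hk; exact ⟨slots_keys_sub vm i hk, (mem_keys_iff_contains vm i).mp hk⟩
  · exact (by decide : pvIdx.Pairwise (· < ·)).filter _

-- reading the slots at the surviving indices is filterMap of get?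
theorem filter_contains_map_getD (d : PySem.Dict Int (String × Int)) (l : List Int) :
    (l.filter (fun i => d.contains i)).map (fun r => d.getD r ("", 0))
      = l.filterMap (fun i => d.get? i) := by
  induction l with
  | nil => rfl
  | cons i l ih =>
    cases h : d.get? i with
    | none =>
      have hc : d.contains i = false := by
        rw [PySem.Dict.contains_eq_isSome_get?, h]; rfl
      simp [List.filter, hc, h, ih]
    | some v =>
      have hc : d.contains i = true := by
        rw [PySem.Dict.contains_eq_isSome_get?, h]; rfl
      have hg : d.getD i ("", 0) = v := by
        rw [PySem.Dict.getD_eq_get?_getD, h]; rfl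
      simp [List.filter, hc, h, hg, ih]

theorem filterMap_eq_of_map_eq {l1 : List Int} {l2 : List String}
    {f : Int → Option (String × Int)} {g : String → Option (String × Int)}
    (h : l1.map f = l2.map g) : l1.filterMap f = l2.filterMap g := by
  have h2 : (l1.map f).filterMap id = (l2.map g).filterMap id := by rw [h]
  simpa [List.filterMap_map, Function.comp] using h2

-- a single slot is A's last-match for the corresponding lowercased name
theorem slot_get_eq (vm : List (String × Int)) (k : Int) (low : String)
    (hk : ∀ s, (pvRank.get? s == some k) = (s == low)) :
    (pvSlots vm).get? k = pvLastMatch vm low := by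
  rw [slots_get?_scan]
  unfold pvLastMatch
  refine PySem.List.foldl_congr_mem _ _ _ _ ?_
  intro hit p _
  rw [hk]

set_option maxHeartbeats 2000000 in
theorem idx_filterMap_eq (vm : List (String × Int)) :
    pvIdx.filterMap (fun i => (pvSlots vm).get? i) = pvLows.filterMap (pvLastMatch vm) := by
  apply filterMap_eq_of_map_eq
  simp only [pvIdx, pvLows, List.map_cons, List.map_nil]
  rw [slot_get_eq vm 0 "seasonic" (pvRank_char 0 "seasonic" (by decide) (by decide)),
      slot_get_eq vm 1 "sea sonic" (pvRank_char 1 "sea sonic" (by decide) (by decide)),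
      slot_get_eq vm 2 "super flower" (pvRank_char 2 "super flower" (by decide) (by decide)),
      slot_get_eq vm 3 "corsair" (pvRank_char 3 "corsair" (by decide) (by decide)),
      slot_get_eq vm 4 "evga corporation" (pvRank_char 4 "evga corporation" (by decide) (by decide)),
      slot_get_eq vm 5 "evga" (pvRank_char 5 "evga" (by decide) (by decide)),
      slot_get_eq vm 6 "cooler master" (pvRank_char 6 "cooler master" (by decide) (by decide)),
      slot_get_eq vm 7 "be quiet!" (pvRank_char 7 "be quiet!" (by decide) (by decide)),
      slot_get_eq vm 8 "fsp group" (pvRank_char 8 "fsp group" (by decide) (by decide)),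
      slot_get_eq vm 9 "thermaltake" (pvRank_char 9 "thermaltake" (by decide) (by decide)),
      slot_get_eq vm 10 "chieftec" (pvRank_char 10 "chieftec" (by decide) (by decide)),
      slot_get_eq vm 11 "antec" (pvRank_char 11 "antec" (by decide) (by decide)),
      slot_get_eq vm 12 "xfx" (pvRank_char 12 "xfx" (by decide) (by decide)),
      slot_get_eq vm 13 "gigabyte technology" (pvRank_char 13 "gigabyte technology" (by decide) (by decide)),
      slot_get_eq vm 14 "gigabyte" (pvRank_char 14 "gigabyte" (by decide) (by decide)),
      slot_get_eq vm 15 "msi" (pvRank_char 15 "msi" (by decide) (by decide)),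
      slot_get_eq vm 16 "silverstone" (pvRank_char 16 "silverstone" (by decide) (by decide)),
      slot_get_eq vm 17 "nzxt" (pvRank_char 17 "nzxt" (by decide) (by decide))]

theorem chosenB_eq (vm : List (String × Int)) :
    (PySem.List.sorted (pvSlots vm).keys (fun x => x) false).map
        (fun r => (pvSlots vm).getD r ("", 0))
      = pvLows.filterMap (pvLastMatch vm) := by
  rw [sorted_keys_eq, filter_contains_map_getD, idx_filterMap_eq]

theorem slots_size_iff (vm : List (String × Int)) :
    ((pvSlots vm).size ≠ 0) ↔ pvLows.filterMap (pvLastMatch vm) ≠ [] := by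
  rw [← chosenB_eq]
  constructor
  · intro h hmap
    apply h
    rcases List.map_eq_nil_iff.mp hmap with hs
    have hk : (pvSlots vm).keys = [] := by
      rwa [PySem.List.sorted_eq_nil_iff _ _ _] at hs
    have : (pvSlots vm).keys.length = 0 := by rw [hk]; rfl
    simpa [PySem.Dict.keys, PySem.Dict.size] using this
  · intro h hsz
    apply h
    have hk : (pvSlots vm).keys = [] := by
      have : (pvSlots vm).keys.length = 0 := by
        simpa [PySem.Dict.keys, PySem.Dict.size] using hsz
      exact List.length_eq_zero_iff.mp this
    rw [(PySem.List.sorted_eq_nil_iff _ _ _).mpr hk]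
    rfl

-- ===== VERDICT (by name: the statement is the Claim_ definition above) =====
theorem pick_psu_vendors_spec : Claim_equal_pick_psu_vendors := by
  intro vm _
  show pick_psu_vendors vm = pick_psu_vendors_alt vm
  dsimp only [pick_psu_vendors, pick_psu_vendors_alt]
  rw [chosenA_eq vm, chosenB_eq vm]
  split_ifs with h1 h2
  · rfl
  · exact absurd h1 (fun h => h2 ((slots_size_iff vm).mpr h))
  · exact absurd ((slots_size_iff vm).mp ‹_›) h1
  · rfl
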